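-- pv_equiv track=rewrite | github.com/alexh-scrt/homunculus | src/arena/persistence/tournament.py | _calculate_round_robin_standings
-- ===== SOURCE A (Python) =====
-- from typing import Dict, List, Optional, Any, Tuple, Set
--
-- def _calculate_round_robin_standings(
--
--     stats: Dict[str, Dict[str, int]]
-- ) -> List[Tuple[str, int]]:
--     """Calculate standings for round-robin tournament."""
--     # Sort by wins (and win percentage)
--     sorted_participants = sorted(
--         stats.items(),
--         key=lambda x: (x[1]["wins"], -x[1]["losses"]),
--         reverse=True
--     )
--
--     standings = []
--     position = 1
--     prev_wins = None
--     same_position_count = 0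
--
--     for participant, participant_stats in sorted_participants:
--         wins = participant_stats["wins"]
--
--         # Handle ties
--         if wins == prev_wins:
--             same_position_count += 1
--         else:
--             position += same_position_count
--             same_position_count = 1
--             prev_wins = wins
--
--         standings.append((participant, position))
--
--     return standings
-- ===== SOURCE B (Python) =====
-- def _calculate_round_robin_standings(stats):
--     """Calculate standings: rank = 1 + number of participants with strictly more wins."""
--     ordered = sorted(
--         stats.items(),
--         key=lambda x: (x[1]["wins"], -x[1]["losses"]),
--         reverse=True,
--     )
--     wins = [d["wins"] for _, d in ordered]
--     return [(p, 1 + sum(1 for w2 in wins if w2 > d["wins"])) for p, d in ordered]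
-- ===== Notes on version B (the rewrite author's own statement) =====
-- stated objective: alternative
-- what changed: B drops A's sequential tie accumulator (position/prev_wins/same_position_count carried through the sorted scan) and instead computes each participant's rank directly as 1 + the count of participants with strictly more wins, a counting formulation of competition ranking.
import Mathlib
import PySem

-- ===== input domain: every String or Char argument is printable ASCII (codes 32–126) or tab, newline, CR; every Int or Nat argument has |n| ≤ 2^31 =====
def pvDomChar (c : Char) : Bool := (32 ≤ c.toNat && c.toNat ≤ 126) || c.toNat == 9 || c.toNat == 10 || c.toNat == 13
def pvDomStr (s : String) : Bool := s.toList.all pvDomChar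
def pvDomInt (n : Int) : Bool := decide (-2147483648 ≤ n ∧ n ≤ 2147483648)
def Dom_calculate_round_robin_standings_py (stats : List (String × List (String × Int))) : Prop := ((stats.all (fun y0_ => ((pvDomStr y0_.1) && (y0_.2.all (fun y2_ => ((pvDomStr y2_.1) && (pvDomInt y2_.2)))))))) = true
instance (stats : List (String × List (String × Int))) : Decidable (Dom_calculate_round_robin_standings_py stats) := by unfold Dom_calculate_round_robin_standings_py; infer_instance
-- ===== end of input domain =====

-- B replaces A's sequential tie accumulator (position/prev_wins/same_position_count) by a direct
-- counting rule: each participant's rank is 1 + the number of participants with strictly more wins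
-- (objective: alternative; same asymptotic cost).

-- shared key helpers: d["wins"] / d["losses"] (first match; Pre_ requires the keys present)
def pvWins (d : List (String × Int)) : Int := (PySem.Dict.mk d).getD "wins" 0
def pvLosses (d : List (String × Int)) : Int := (PySem.Dict.mk d).getD "losses" 0

-- ===== PORT A =====
-- the for-loop of A, carrying (position, prev_wins, same_position_count)
def pvALoop : List (String × List (String × Int)) → Int → Option Int → Int → List (String × Int)
  | [], _, _, _ => []
  | x :: xs, position, prevWins, cnt =>
    let wins := pvWins x.2
    if prevWins = some wins then
      (x.1, position) :: pvALoop xs position prevWins (cnt + 1)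
    else
      let position' := position + cnt
      (x.1, position') :: pvALoop xs position' (some wins) 1

def calculate_round_robin_standings_py (stats : List (String × List (String × Int))) : List (String × Int) :=
  let sorted_participants :=
    PySem.List.sorted2 stats (fun x => pvWins x.2) (fun x => -(pvLosses x.2)) true
  pvALoop sorted_participants 1 none 0

-- ===== PORT B =====
def calculate_round_robin_standings_py_alt (stats : List (String × List (String × Int))) : List (String × Int) :=
  let ordered :=
    PySem.List.sorted2 stats (fun x => pvWins x.2) (fun x => -(pvLosses x.2)) true
  let wins := ordered.map (fun x => pvWins x.2)
  ordered.map (fun x => (x.1, 1 + ((wins.countP (fun w2 => decide (pvWins x.2 < w2)) : Nat) : Int)))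

-- ===== PRECONDITION & SPEC =====
-- Pre_ excludes inputs on which Python A raises KeyError (an inner dict missing "wins" or "losses"),
-- and assoc lists with duplicate keys (outer or inner), which a Python dict argument cannot represent
-- (a dict literal collapses them, so the assoc-list ports cannot be faithful there).
def Pre_calculate_round_robin_standings_py (stats : List (String × List (String × Int))) : Prop :=
  (stats.map (·.1)).Nodup ∧
  ∀ p ∈ stats, (p.2.map (·.1)).Nodup ∧ "wins" ∈ p.2.map (·.1) ∧ "losses" ∈ p.2.map (·.1)
instance (stats : List (String × List (String × Int))) : Decidable (Pre_calculate_round_robin_standings_py stats) := by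
  unfold Pre_calculate_round_robin_standings_py; infer_instance

def pvWitness_calculate_round_robin_standings_py : (List (String × List (String × Int))) :=
  [("a", [("wins", 2), ("losses", 0)]), ("b", [("wins", 2), ("losses", 1)]), ("c", [("wins", 0), ("losses", 3)])]

def Spec_calculate_round_robin_standings_py (stats : List (String × List (String × Int))) (out : List (String × Int)) : Prop := out = calculate_round_robin_standings_py_alt stats
instance (stats : List (String × List (String × Int))) (out : List (String × Int)) : Decidable (Spec_calculate_round_robin_standings_py stats out) := by unfold Spec_calculate_round_robin_standings_py; infer_instance

-- ===== CLAIM =====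
def Claim_equal_calculate_round_robin_standings_py : Prop := ∀ (stats : List (String × List (String × Int))), Dom_calculate_round_robin_standings_py stats → Pre_calculate_round_robin_standings_py stats → Spec_calculate_round_robin_standings_py stats (calculate_round_robin_standings_py stats)

-- ===== LEMMAS AND PROOFS =====

-- insertBy preserves Pairwise R for any comparator compatible with a transitive R
theorem pvInsertBy_pairwise {α : Type} (before : α → α → Bool) (R : α → α → Prop)
    (htrans : Transitive R)
    (h1 : ∀ a b, before a b = true → R a b)
    (h2 : ∀ a b, before a b = false → R b a)
    (x : α) : ∀ ys : List α, ys.Pairwise R → (PySem.List.insertBy before x ys).Pairwise R := by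
  intro ys
  induction ys with
  | nil => intro _; simp [PySem.List.insertBy]
  | cons y ys ih =>
    intro h
    rcases List.pairwise_cons.mp h with ⟨hy, hys⟩
    rw [PySem.List.insertBy]
    by_cases hb : before x y = true
    · rw [if_pos hb]
      refine List.pairwise_cons.mpr ⟨?_, h⟩
      intro z hz
      rcases List.mem_cons.mp hz with rfl | hz
      · exact h1 _ _ hb
      · exact htrans (h1 _ _ hb) (hy z hz)
    · rw [if_neg hb]
      refine List.pairwise_cons.mpr ⟨?_, ih hys⟩
      intro z hz
      rcases (PySem.List.mem_insertBy _ _ _ _).mp hz with rfl | hz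
      · exact h2 _ _ (Bool.eq_false_iff.mpr hb)
      · exact hy z hz

-- the sorted2 (reverse=True) output is pairwise descending on its FIRST key
theorem pvSorted2_pairwise_fst {α : Type} (xs : List α) (k1 : α → Int) (k2 : α → Int) :
    (PySem.List.sorted2 xs k1 k2 true).Pairwise (fun a b => k1 b ≤ k1 a) := by
  simp only [PySem.List.sorted2]
  set before : α → α → Bool :=
    fun a b => decide (k1 b < k1 a) || (!decide (k1 a < k1 b) && decide (k2 b < k2 a)) with hb
  have h1 : ∀ a b, before a b = true → k1 b ≤ k1 a := by
    intro a b h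
    simp only [hb, Bool.or_eq_true, Bool.and_eq_true, Bool.not_eq_true', decide_eq_true_eq,
      decide_eq_false_iff_not] at h
    rcases h with h | ⟨h, _⟩
    · exact le_of_lt h
    · exact le_of_not_gt h
  have h2 : ∀ a b, before a b = false → k1 a ≤ k1 b := by
    intro a b h
    simp only [hb, Bool.or_eq_false_iff, decide_eq_false_iff_not] at h
    exact le_of_not_gt h.1
  have htrans : Transitive (fun a b : α => k1 b ≤ k1 a) := fun _ _ _ hab hbc => le_trans hbc hab
  suffices H : ∀ (l : List α) (acc : List α), acc.Pairwise (fun a b => k1 b ≤ k1 a) →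
      (l.foldl (fun acc x => PySem.List.insertBy before x acc) acc).Pairwise (fun a b => k1 b ≤ k1 a) by
    exact H xs [] (by simp)
  intro l
  induction l with
  | nil => intro acc h; simpa using h
  | cons z l ih =>
    intro acc h
    exact ih _ (pvInsertBy_pairwise before _ htrans h1 h2 z acc h)

-- consuming a run of equal wins: A's loop stays in the tie branch throughout
theorem pvALoop_run (run : List (String × List (String × Int)))
    (xs : List (String × List (String × Int))) (pos : Int) (w : Int) :
    ∀ cnt : Int, (∀ y ∈ run, pvWins y.2 = w) →
    pvALoop (run ++ xs) pos (some w) cnt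
      = run.map (fun x => (x.1, pos)) ++ pvALoop xs pos (some w) (cnt + run.length) := by
  induction run with
  | nil => intro cnt _; simp
  | cons y ys ih =>
    intro cnt h
    have hy : pvWins y.2 = w := h y (by simp)
    simp only [List.cons_append, pvALoop]
    rw [hy, if_pos rfl]
    rw [ih (cnt + 1) (fun z hz => h z (by simp [hz]))]
    simp only [List.map_cons, List.length_cons, List.cons_append]
    push_cast
    ring_nf

-- on a wins-descending list, A's loop assigns rank (base + #strictly-greater-wins) to every element
theorem pvALoop_eq_count (n : Nat) :
    ∀ (s : List (String × List (String × Int))) (pos cnt : Int) (prev : Option Int),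
    s.length ≤ n →
    s.Pairwise (fun a b => pvWins b.2 ≤ pvWins a.2) →
    (∀ x, s.head? = some x → prev ≠ some (pvWins x.2)) →
    pvALoop s pos prev cnt
      = s.map (fun x => (x.1, pos + cnt +
          ((s.countP (fun y => decide (pvWins x.2 < pvWins y.2)) : Nat) : Int))) := by
  induction n with
  | zero =>
    intro s pos cnt prev hn _ _
    have : s = [] := List.eq_nil_of_length_eq_zero (Nat.le_zero.mp hn)
    subst this
    simp [pvALoop]
  | succ n ih =>
    intro s pos cnt prev hn hpw hhd
    cases s with
    | nil => simp [pvALoop]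
    | cons x xs =>
      have hne : prev ≠ some (pvWins x.2) := hhd x rfl
      set w0 := pvWins x.2 with hw0
      set p : String × List (String × Int) → Bool := fun y => pvWins y.2 == w0 with hp
      have hle : ∀ y ∈ xs, pvWins y.2 ≤ w0 := (List.pairwise_cons.mp hpw).1
      have hpwxs : xs.Pairwise (fun a b => pvWins b.2 ≤ pvWins a.2) := (List.pairwise_cons.mp hpw).2
      have hrun : ∀ y ∈ xs.takeWhile p, pvWins y.2 = w0 := by
        intro y hy
        have := List.mem_takeWhile_imp hy
        simpa [hp] using this
      have hpwr : (xs.dropWhile p).Pairwise (fun a b => pvWins b.2 ≤ pvWins a.2) :=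
        hpwxs.sublist (List.dropWhile_sublist p)
      have hlt : ∀ y ∈ xs.dropWhile p, pvWins y.2 < w0 := by
        cases hdrop : xs.dropWhile p with
        | nil => simp
        | cons hd t =>
          have hhmem : hd ∈ xs := (List.dropWhile_sublist p).subset (by simp [hdrop])
          have hhne : pvWins hd.2 ≠ w0 := by
            have hfalse := List.head?_dropWhile_not p xs
            rw [hdrop] at hfalse
            simpa [hp] using hfalse
          have hhlt : pvWins hd.2 < w0 := lt_of_le_of_ne (hle hd hhmem) hhne
          intro y hy
          rcases List.mem_cons.mp hy with rfl | hy
          · exact hhlt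
          · have hble : pvWins y.2 ≤ pvWins hd.2 := by
              have h2 := hpwr
              rw [hdrop] at h2
              exact (List.pairwise_cons.mp h2).1 y hy
            exact lt_of_le_of_lt hble hhlt
      have hsplit : xs = xs.takeWhile p ++ xs.dropWhile p := (List.takeWhile_append_dropWhile).symm
      -- LHS: peel the head, consume the run, recurse on the rest
      simp only [pvALoop]
      rw [if_neg hne]
      conv_lhs => rw [hsplit]
      rw [pvALoop_run _ _ _ _ 1 hrun]
      have hdroplen : (xs.dropWhile p).length ≤ n := by
        have h1 := List.length_dropWhile_le p xs
        simp only [List.length_cons] at hn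
        omega
      have hdrophd : ∀ y, (xs.dropWhile p).head? = some y →
          (some w0 : Option Int) ≠ some (pvWins y.2) := by
        intro y hy
        have hmem : y ∈ xs.dropWhile p := by
          cases hdrop : xs.dropWhile p with
          | nil => rw [hdrop] at hy; simp at hy
          | cons hd t => rw [hdrop] at hy; simp at hy; simp [hy]
        intro hc
        exact absurd (Option.some.inj hc).symm (ne_of_lt (hlt y hmem))
      rw [ih (xs.dropWhile p) (pos + cnt) (1 + (xs.takeWhile p).length) (some w0) hdroplen hpwr
        (fun y hy => hdrophd y hy)]
      -- RHS: split the mapped list the same way and compare segmentwise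
      conv_rhs => rw [hsplit]
      -- count facts
      have hcount0 : ∀ y : String × List (String × Int), pvWins y.2 = w0 →
          ((x :: (xs.takeWhile p ++ xs.dropWhile p)).countP
            (fun z => decide (pvWins y.2 < pvWins z.2))) = 0 := by
        intro y hy
        rw [List.countP_eq_zero]
        intro z hz
        simp only [decide_eq_true_eq, hy, not_lt]
        rcases List.mem_cons.mp hz with rfl | hz
        · exact le_of_eq hw0.symm
        · exact hle z (by rw [hsplit]; exact hz)
      have hcountr : ∀ y ∈ xs.dropWhile p,
          ((x :: (xs.takeWhile p ++ xs.dropWhile p)).countP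
            (fun z => decide (pvWins y.2 < pvWins z.2)))
          = 1 + (xs.takeWhile p).length
            + ((xs.dropWhile p).countP (fun z => decide (pvWins y.2 < pvWins z.2))) := by
        intro y hy
        have hylt : pvWins y.2 < w0 := hlt y hy
        rw [List.countP_cons, List.countP_append]
        have hxc : (decide (pvWins y.2 < pvWins x.2) : Bool) = true := by
          simp [← hw0, hylt]
        have hruncnt : (xs.takeWhile p).countP (fun z => decide (pvWins y.2 < pvWins z.2))
            = (xs.takeWhile p).length := by
          rw [List.countP_eq_length]
          intro z hz
          have := hrun z hz
          simp [this, hylt]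
        rw [hxc, hruncnt]
        simp
        omega
      simp only [List.map_cons, List.map_append]
      congr 1
      · -- head
        have h0 := hcount0 x rfl
        rw [h0]
        simp
      congr 1
      · -- run segment
        apply List.map_congr_left
        intro y hy
        have h0 := hcount0 y (hrun y hy)
        rw [h0]
        simp
      · -- rest segment
        apply List.map_congr_left
        intro y hy
        have hc := hcountr y hy
        rw [hc]
        simp only [Prod.mk.injEq, true_and]
        push_cast
        ring

-- ===== VERDICT =====
theorem calculate_round_robin_standings_py_spec : Claim_equal_calculate_round_robin_standings_py := by
  intro stats _ _
  unfold Spec_calculate_round_robin_standings_py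
  unfold calculate_round_robin_standings_py calculate_round_robin_standings_py_alt
  set s := PySem.List.sorted2 stats (fun x => pvWins x.2) (fun x => -(pvLosses x.2)) true with hs
  have hpw : s.Pairwise (fun a b => pvWins b.2 ≤ pvWins a.2) :=
    pvSorted2_pairwise_fst stats (fun x => pvWins x.2) (fun x => -(pvLosses x.2))
  rw [pvALoop_eq_count s.length s 1 0 none (le_refl _) hpw (fun x _ => by simp)]
  apply List.map_congr_left
  intro y _
  simp only [List.countP_map, Function.comp_def, Prod.mk.injEq, true_and]
  ring_nf
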